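-- pv_equiv track=rewrite | github.com/Icewater1111/FinAgent | main.py | split_numbered_items
-- ===== SOURCE A (Python) =====
-- from typing import Any, Dict, Tuple, List, Literal, TypedDict, Optional
--
-- def split_numbered_items(s: str) -> List[str]:
--     """
--     将一个包含编号列表的字符串拆分成单个项目的列表。
--     例如："1. Item One 2. Item Two" -> ["Item One", "Item Two"]
--     """
--     # 查找所有数字点空格的起始位置，表示一个新项目的开始
--     starts = [i for i in range(len(s) - 2) if s[i].isdigit() and s[i + 1] == '.' and s[i + 2].isspace()]
--     # 在列表末尾添加字符串的总长度，以便处理最后一个项目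
--     starts.append(len(s))
--     items: List[str] = []
--     # 遍历起始位置列表，提取每个项目的内容
--     for idx in range(len(starts) - 1):
--         # 截取当前项目对应的字符串片段
--         seg = s[starts[idx]:starts[idx + 1]]
--         # 找到第一个点号的位置
--         dot_pos = seg.find('.')
--         # 提取点号之后的内容并去除首尾空格
--         content = seg[dot_pos + 1:].strip()
--         # 如果内容被双星号包裹，则去除双星号
--         if content.startswith("**") and content.endswith("**"):
--             content = content[2:-2].strip()
--         items.append(content)
--     return items
-- ===== SOURCE B (Python) =====
-- def _finish(buf):
--     c = ''.join(buf).strip()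
--     if c.startswith("**") and c.endswith("**"):
--         c = c[2:-2].strip()
--     return c
--
--
-- def split_numbered_items(s):
--     items = []
--     buf = None          # chars of the current item; None before the first marker
--     i, n = 0, len(s)
--     while i < n:
--         if i + 3 <= n and s[i].isdigit() and s[i + 1] == '.' and s[i + 2].isspace():
--             if buf is not None:
--                 items.append(_finish(buf))
--             buf = []
--             i += 3
--         else:
--             if buf is not None:
--                 buf.append(s[i])
--             i += 1
--     if buf is not None:
--         items.append(_finish(buf))
--     return items
-- ===== Notes on version B (the rewrite author's own statement) =====
-- stated objective: alternative
-- what changed: A precomputes the list of all marker start indices via an index-range comprehension and then re-slices the string and re-finds the dot for every segment; B is a single left-to-right scan that detects each digit-dot-space marker in place, closing the current item buffer and opening a new one, with no index list and no per-segment searching.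
import Mathlib
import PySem

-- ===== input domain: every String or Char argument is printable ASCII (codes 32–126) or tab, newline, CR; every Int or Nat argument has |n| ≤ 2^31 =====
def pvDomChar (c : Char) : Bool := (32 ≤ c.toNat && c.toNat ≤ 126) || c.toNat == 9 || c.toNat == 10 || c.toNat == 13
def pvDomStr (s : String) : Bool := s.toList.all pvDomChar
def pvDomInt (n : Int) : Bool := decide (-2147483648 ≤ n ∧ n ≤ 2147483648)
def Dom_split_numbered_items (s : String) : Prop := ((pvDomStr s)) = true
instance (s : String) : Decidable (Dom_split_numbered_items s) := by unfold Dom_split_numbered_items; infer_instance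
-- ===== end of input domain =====

-- B replaces A's precomputed start-index list plus per-segment slicing and dot-search by a single
-- left-to-right scan that opens an item at each digit-dot-space marker (objective: alternative; same O(n) cost).

-- ===== PORT A =====
def split_numbered_items (s : String) : List String :=
  let cs := s.toList
  let n : Int := cs.length
  let starts : List Int :=
    (PySem.List.pyRange 0 (n - 2) 1).filter (fun i =>
      PySem.Chars.isdigit (PySem.List.pyGetD cs i ' ')
      && (PySem.List.pyGetD cs (i + 1) ' ' == '.')
      && PySem.Chars.isspace (PySem.List.pyGetD cs (i + 2) ' '))
  let starts := starts ++ [n]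
  (PySem.List.pyRange 0 ((starts.length : Int) - 1) 1).foldl (fun items idx =>
    let seg := PySem.List.slice cs (some (PySem.List.pyGetD starts idx 0)) (some (PySem.List.pyGetD starts (idx + 1) 0))
    let dot_pos := PySem.Chars.find seg ['.']
    let content := PySem.Chars.strip (PySem.List.slice seg (some (dot_pos + 1)) none)
    let content := if PySem.Chars.startswith content ['*', '*'] && PySem.Chars.endswith content ['*', '*']
      then PySem.Chars.strip (PySem.List.slice content (some 2) (some (-2)))
      else content
    items ++ [String.ofList content]) []


-- ===== PORT B =====
-- Source B's `_finish`
def pvFinish (buf : List Char) : String :=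
  let c := PySem.Chars.strip buf
  let c := if PySem.Chars.startswith c ['*', '*'] && PySem.Chars.endswith c ['*', '*']
    then PySem.Chars.strip (PySem.List.slice c (some 2) (some (-2)))
    else c
  String.ofList c

-- Source B's while loop; `buf = None` is `none`, appending a char is `b ++ [c]`
def pvLoop (cs : List Char) (n i : Nat) (buf : Option (List Char)) (items : List String) : List String :=
  if _h : i < n then
    if decide (i + 3 ≤ n) && PySem.Chars.isdigit (cs.getD i ' ')
        && (cs.getD (i + 1) ' ' == '.') && PySem.Chars.isspace (cs.getD (i + 2) ' ') then
      pvLoop cs n (i + 3) (some []) (match buf with | none => items | some b => items ++ [pvFinish b])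
    else
      pvLoop cs n (i + 1) (buf.map (fun b => b ++ [cs.getD i ' '])) items
  else
    match buf with | none => items | some b => items ++ [pvFinish b]
termination_by n - i
decreasing_by all_goals omega

def split_numbered_items_alt (s : String) : List String :=
  pvLoop s.toList s.toList.length 0 none []

-- ===== PRECONDITION & SPEC =====
def Spec_split_numbered_items (s : String) (out : List String) : Prop := out = split_numbered_items_alt s
instance (s : String) (out : List String) : Decidable (Spec_split_numbered_items s out) := by unfold Spec_split_numbered_items; infer_instance

-- ===== CLAIM (what is proved, stated in full; the proofs are below) =====
def Claim_equal_split_numbered_items : Prop := ∀ (s : String), Dom_split_numbered_items s → Spec_split_numbered_items s (split_numbered_items s)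

-- ===== LEMMAS AND PROOFS =====

def pvP (cs : List Char) (i : Nat) : Bool :=
  decide (i + 3 ≤ cs.length) && PySem.Chars.isdigit (cs.getD i ' ')
    && (cs.getD (i + 1) ' ' == '.') && PySem.Chars.isspace (cs.getD (i + 2) ' ')
def pvF (cs : List Char) (i : Nat) : List Nat :=
  (List.range' i (cs.length - i)).filter (pvP cs)
theorem pv_digit_not_space (c : Char) (h : PySem.Chars.isdigit c = true) : PySem.Chars.isspace c = false := by
  simp [PySem.Chars.isdigit, Char.le_def, UInt32.le_iff_toNat_le] at h
  simp only [PySem.Chars.isspace, Bool.or_eq_false_iff, Bool.and_eq_false_iff, decide_eq_false_iff_not]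
  omega
theorem pvP_next_false (cs : List Char) (m : Nat) (h : pvP cs m = true) :
    pvP cs (m + 1) = false ∧ pvP cs (m + 2) = false := by
  simp only [pvP, Bool.and_eq_true, decide_eq_true_eq, beq_iff_eq] at h
  obtain ⟨⟨⟨hb, hd⟩, hdot⟩, hsp⟩ := h
  constructor
  · have : PySem.Chars.isdigit (cs.getD (m + 1) ' ') = false := by
      rw [hdot]; decide
    simp only [pvP, this, Bool.and_false, Bool.false_and]
  · have : PySem.Chars.isdigit (cs.getD (m + 2) ' ') = false := by
      cases hdig : PySem.Chars.isdigit (cs.getD (m + 2) ' ') with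
      | false => rfl
      | true => rw [pv_digit_not_space _ hdig] at hsp; cases hsp
    simp only [pvP, this, Bool.and_false, Bool.false_and]
theorem pvF_stop (cs : List Char) (i : Nat) (h : cs.length ≤ i) : pvF cs i = [] := by
  simp [pvF, Nat.sub_eq_zero_of_le h]
theorem pvF_cons (cs : List Char) (i : Nat) (h : i < cs.length) :
    pvF cs i = if pvP cs i then i :: pvF cs (i + 1) else pvF cs (i + 1) := by
  have h1 : cs.length - i = (cs.length - (i + 1)) + 1 := by omega
  rw [pvF, h1, List.range'_succ, List.filter_cons]
  rfl
theorem pvF_skip (cs : List Char) (i : Nat) (h : pvP cs i = true) :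
    pvF cs (i + 1) = pvF cs (i + 3) := by
  have hb : i + 3 ≤ cs.length := by
    have := h; simp only [pvP, Bool.and_eq_true, decide_eq_true_eq] at this; exact this.1.1.1
  obtain ⟨h1, h2⟩ := pvP_next_false cs i h
  rw [pvF_cons cs (i+1) (by omega), pvF_cons cs (i+2) (by omega), h1, h2]
  simp
theorem pvHd_mem_aux (cs : List Char) (i m : Nat) (t : List Nat) (h : pvF cs i = m :: t) : i ≤ m ∧ m < cs.length ∧ pvP cs m = true := by
  have hm : m ∈ pvF cs i := by rw [h]; exact List.mem_cons_self
  rw [pvF, List.mem_filter] at hm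
  obtain ⟨hr, hp⟩ := hm
  rw [List.mem_range'_1] at hr
  exact ⟨hr.1, by omega, hp⟩
def pvHd (cs : List Char) (i : Nat) : Nat :=
  match pvF cs i with
  | [] => cs.length
  | m :: _ => m
def pvPairs (cs : List Char) : List Nat → List String
  | a :: b :: t => pvFinish ((cs.drop (a + 2)).take (b - (a + 2))) :: pvPairs cs (b :: t)
  | _ => []
theorem pv_strip_cons_space (c : Char) (t : List Char) (h : PySem.Chars.isspace c = true) :
    PySem.Chars.strip (c :: t) = PySem.Chars.strip t := by
  simp [PySem.Chars.strip, PySem.Chars.lstrip, List.dropWhile, h]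

theorem pvHd_ge (cs : List Char) (i : Nat) (h : i ≤ cs.length) : i ≤ pvHd cs i := by
  rw [pvHd]
  cases hF : pvF cs i with
  | nil => exact h
  | cons m t => exact (pvHd_mem_aux cs i m t hF).1

theorem pvHd_eq_headD (cs : List Char) (i : Nat) : pvHd cs i = (pvF cs i ++ [cs.length]).headD 0 := by
  rw [pvHd]; cases pvF cs i <;> simp

theorem pvPairs_cons (cs : List Char) (i n : Nat) (L : List Nat) :
    pvPairs cs ((i :: L) ++ [n]) =
      pvFinish ((cs.drop (i + 2)).take ((L ++ [n]).headD 0 - (i + 2))) :: pvPairs cs (L ++ [n]) := by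
  cases L <;> simp [pvPairs]

theorem pv_item_shift (cs : List Char) (a b : Nat) (ha : pvP cs a = true) (hab : a + 3 ≤ b) :
    pvFinish ((cs.drop (a + 2)).take (b - (a + 2))) = pvFinish ((cs.drop (a + 3)).take (b - (a + 3))) := by
  simp only [pvP, Bool.and_eq_true, decide_eq_true_eq] at ha
  obtain ⟨⟨⟨hb3, _⟩, _⟩, hsp⟩ := ha
  have h2 : a + 2 < cs.length := by omega
  have hdrop : cs.drop (a + 2) = cs[a + 2] :: cs.drop (a + 3) := List.drop_eq_getElem_cons h2
  have hget : cs.getD (a + 2) ' ' = cs[a + 2] := List.getD_eq_getElem cs ' ' h2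
  rw [hdrop]
  have htake : b - (a + 2) = (b - (a + 3)) + 1 := by omega
  rw [htake, List.take_succ_cons]
  rw [pvFinish, pvFinish, pv_strip_cons_space _ _ (by rw [← hget]; exact hsp)]
theorem pvLoop_eq (cs : List Char) :
    ∀ (k i : Nat) (buf : Option (List Char)) (items : List String), cs.length - i = k →
      pvLoop cs cs.length i buf items = items ++ (match buf with
        | none => pvPairs cs (pvF cs i ++ [cs.length])
        | some b => pvFinish (b ++ (cs.drop i).take (pvHd cs i - i)) :: pvPairs cs (pvF cs i ++ [cs.length])) := by
  intro k
  induction k using Nat.strong_induction_on with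
  | _ k IH =>
  intro i buf items hk
  rw [pvLoop.eq_def]
  by_cases hlt : i < cs.length
  · rw [dif_pos hlt]
    rw [show (decide (i + 3 ≤ cs.length) && PySem.Chars.isdigit (cs.getD i ' ')
        && (cs.getD (i + 1) ' ' == '.') && PySem.Chars.isspace (cs.getD (i + 2) ' ')) = pvP cs i from rfl]
    by_cases hp : pvP cs i = true
    · rw [if_pos hp]
      have hb3 : i + 3 ≤ cs.length := by
        have := hp; simp only [pvP, Bool.and_eq_true, decide_eq_true_eq] at this; exact this.1.1.1
      rw [IH (cs.length - (i + 3)) (by omega) (i + 3) (some []) _ rfl]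
      have hFi : pvF cs i = i :: pvF cs (i + 3) := by
        rw [pvF_cons _ _ hlt, if_pos hp, pvF_skip _ _ hp]
      have hHdi : pvHd cs i = i := by rw [pvHd, hFi]
      have hge : i + 3 ≤ pvHd cs (i + 3) := pvHd_ge _ _ hb3
      have hitem : pvFinish ((cs.drop (i + 2)).take (pvHd cs (i + 3) - (i + 2)))
          = pvFinish ((cs.drop (i + 3)).take (pvHd cs (i + 3) - (i + 3))) :=
        pv_item_shift cs i (pvHd cs (i + 3)) hp hge
      cases buf with
      | none =>
        simp only [hFi, pvPairs_cons, ← pvHd_eq_headD, List.nil_append]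
        rw [← hitem]
      | some b =>
        simp only [hFi, pvPairs_cons, ← pvHd_eq_headD, List.nil_append, hHdi]
        rw [← hitem]
        simp [List.append_assoc]
    · rw [if_neg hp]
      rw [IH (cs.length - (i + 1)) (by omega) (i + 1) _ items rfl]
      have hFi : pvF cs i = pvF cs (i + 1) := by
        rw [pvF_cons _ _ hlt, if_neg hp]
      have hhd : pvHd cs i = pvHd cs (i + 1) := by rw [pvHd, pvHd, hFi]
      cases buf with
      | none => simp [hFi]
      | some b =>
        simp only [Option.map_some]
        have hge : i + 1 ≤ pvHd cs (i + 1) := pvHd_ge _ _ (by omega)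
        have hdrop : cs.drop i = cs[i] :: cs.drop (i + 1) := List.drop_eq_getElem_cons hlt
        have hget : cs.getD i ' ' = cs[i] := List.getD_eq_getElem cs ' ' hlt
        have htake : pvHd cs (i + 1) - i = (pvHd cs (i + 1) - (i + 1)) + 1 := by omega
        rw [hFi, hhd, hdrop, htake, List.take_succ_cons, hget]
        simp [List.append_assoc]
  · rw [dif_neg hlt]
    have hF : pvF cs i = [] := pvF_stop _ _ (by omega)
    have hdrop : cs.drop i = [] := List.drop_eq_nil_of_le (by omega)
    cases buf with
    | none => simp [hF, pvPairs]
    | some b => simp [hF, pvPairs, pvHd, hdrop]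
theorem pv_digit_not_dot (c : Char) (h : PySem.Chars.isdigit c = true) : (c == '.') = false := by
  simp [PySem.Chars.isdigit, Char.le_def, UInt32.le_iff_toNat_le] at h
  simp only [beq_eq_false_iff_ne, ne_eq]
  rintro rfl
  have : ('.').toNat = 46 := by decide
  omega
theorem pv_find_two (x y : Char) (t : List Char) (hx : ¬ ('.' = x)) (hy : y = '.') :
    PySem.Chars.find (x :: y :: t) ['.'] = 1 := by
  subst hy
  rw [PySem.Chars.find]
  rw [PySem.Chars.find.go.eq_def]
  simp [List.isPrefixOf, hx]
  rw [PySem.Chars.find.go.eq_def]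
  simp [List.isPrefixOf]
def pvItemI (cs : List Char) (a b : Int) : String :=
  let seg := PySem.List.slice cs (some a) (some b)
  let dot_pos := PySem.Chars.find seg ['.']
  let content := PySem.Chars.strip (PySem.List.slice seg (some (dot_pos + 1)) none)
  let content := if PySem.Chars.startswith content ['*', '*'] && PySem.Chars.endswith content ['*', '*']
    then PySem.Chars.strip (PySem.List.slice content (some 2) (some (-2)))
    else content
  String.ofList content

theorem pv_seg_item (cs : List Char) (a b : Nat) (ha : pvP cs a = true) (hab : a + 3 ≤ b) :
    pvItemI cs (a : Int) (b : Int) = pvFinish ((cs.drop (a + 2)).take (b - (a + 2))) := by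
  simp only [pvP, Bool.and_eq_true, decide_eq_true_eq, beq_iff_eq] at ha
  obtain ⟨⟨⟨hb3, hd⟩, hdot⟩, _⟩ := ha
  have h0 : a < cs.length := by omega
  have h1 : a + 1 < cs.length := by omega
  have hseg : PySem.List.slice cs (some (a : Int)) (some (b : Int))
      = cs[a] :: cs[a + 1] :: (cs.drop (a + 2)).take (b - (a + 2)) := by
    rw [PySem.List.slice_natCast]
    rw [List.drop_eq_getElem_cons h0, List.drop_eq_getElem_cons h1]
    have : b - a = (b - (a + 2)) + 1 + 1 := by omega
    rw [this, List.take_succ_cons, List.take_succ_cons]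
  have hgd0 : cs.getD a ' ' = cs[a] := List.getD_eq_getElem cs ' ' h0
  have hgd1 : cs.getD (a + 1) ' ' = cs[a + 1] := List.getD_eq_getElem cs ' ' h1
  have hfind : PySem.Chars.find (cs[a] :: cs[a + 1] :: (cs.drop (a + 2)).take (b - (a + 2))) ['.'] = 1 := by
    apply pv_find_two
    · have hne := pv_digit_not_dot cs[a] (by rw [← hgd0]; exact hd)
      rw [beq_eq_false_iff_ne] at hne
      exact fun heq => hne heq.symm
    · rw [← hgd1]; exact hdot
  rw [pvItemI, hseg, hfind]
  have h2 : ((1 : Int) + 1) = (2 : Int) := by norm_num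
  rw [h2, PySem.List.slice_from _ (by norm_num)]
  rfl
theorem pv_chain (cs : List Char) :
    ∀ (k i : Nat), cs.length - i = k → List.IsChain (fun a b => a + 3 ≤ b) (pvF cs i ++ [cs.length]) := by
  intro k
  induction k using Nat.strong_induction_on with
  | _ k IH =>
  intro i hk
  by_cases hlt : i < cs.length
  · by_cases hp : pvP cs i = true
    · have hb3 : i + 3 ≤ cs.length := by
        have := hp; simp only [pvP, Bool.and_eq_true, decide_eq_true_eq] at this; exact this.1.1.1
      have hFi : pvF cs i = i :: pvF cs (i + 3) := by
        rw [pvF_cons _ _ hlt, if_pos hp, pvF_skip _ _ hp]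
      rw [hFi]
      rw [List.cons_append, List.isChain_cons]
      refine ⟨?_, IH (cs.length - (i + 3)) (by omega) (i + 3) rfl⟩
      intro b hb
      have : b = pvHd cs (i + 3) := by
        rw [pvHd_eq_headD]
        cases hF : pvF cs (i + 3) ++ [cs.length] with
        | nil => simp [hF] at hb
        | cons x t => rw [hF] at hb; simp at hb ⊢; exact hb.symm
      rw [this]
      exact pvHd_ge cs (i + 3) hb3
    · have hFi : pvF cs i = pvF cs (i + 1) := by rw [pvF_cons _ _ hlt, if_neg hp]
      rw [hFi]
      exact IH (cs.length - (i + 1)) (by omega) (i + 1) rfl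
  · rw [pvF_stop _ _ (by omega)]
    simp
theorem pv_mapAdj (cs : List Char) : ∀ (K : List Nat),
    (∀ x ∈ K, pvP cs x = true) →
    List.IsChain (fun a b => a + 3 ≤ b) (K ++ [cs.length]) →
    (List.range ((K ++ [cs.length]).length - 1)).map
      (fun k => pvItemI cs (((K ++ [cs.length]).getD k 0 : Nat) : Int) (((K ++ [cs.length]).getD (k + 1) 0 : Nat) : Int))
      = pvPairs cs (K ++ [cs.length]) := by
  intro K
  induction K with
  | nil => intro _ _; simp [pvPairs]
  | cons a K' IH =>
    intro H1 H2
    obtain ⟨b0, T', hT⟩ : ∃ b0 T', K' ++ [cs.length] = b0 :: T' := by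
      cases K' <;> exact ⟨_, _, rfl⟩
    have hab : a + 3 ≤ b0 := by
      rw [List.cons_append, hT, List.isChain_cons_cons] at H2
      exact H2.1
    have hlen : ((a :: K') ++ [cs.length]).length - 1 = K'.length + 1 := by simp
    rw [hlen, List.range_succ_eq_map, List.map_cons, List.map_map]
    have hhead : pvItemI cs (((a :: K' ++ [cs.length]).getD 0 0 : Nat) : Int)
        (((a :: K' ++ [cs.length]).getD 1 0 : Nat) : Int)
        = pvFinish ((cs.drop (a + 2)).take (b0 - (a + 2))) := by
      have h0 : (a :: (K' ++ [cs.length])).getD 0 0 = a := rfl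
      have h1 : (a :: (K' ++ [cs.length])).getD 1 0 = b0 := by
        rw [List.getD_cons_succ, hT]; rfl
      rw [List.cons_append, h0, h1]
      exact pv_seg_item cs a b0 (H1 a (by simp)) hab
    rw [hhead]
    have htail : (List.range K'.length).map
        ((fun k => pvItemI cs (((a :: K' ++ [cs.length]).getD k 0 : Nat) : Int)
          (((a :: K' ++ [cs.length]).getD (k + 1) 0 : Nat) : Int)) ∘ Nat.succ)
        = pvPairs cs (K' ++ [cs.length]) := by
      have hK'len : K'.length = (K' ++ [cs.length]).length - 1 := by simp
      rw [← IH (fun x hx => H1 x (by simp [hx])) (by rw [List.cons_append] at H2; exact  (by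
        rw [List.isChain_cons] at H2; exact H2.2)), ← hK'len]
      apply List.map_congr_left
      intro k _
      simp only [Function.comp_apply, List.cons_append, List.getD_cons_succ, Nat.succ_eq_add_one]
    rw [htail]
    rw [List.cons_append, hT, pvPairs]
theorem pv_starts_eq (cs : List Char) :
    (List.range (cs.length - 2)).filter (fun k =>
        PySem.Chars.isdigit (cs.getD k ' ') && (cs.getD (k + 1) ' ' == '.')
          && PySem.Chars.isspace (cs.getD (k + 2) ' '))
      = pvF cs 0 := by
  have hF : pvF cs 0 = (List.range cs.length).filter (pvP cs) := by
    rw [pvF, Nat.sub_zero, ← List.range_eq_range']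
  rw [hF]
  by_cases h2 : 2 ≤ cs.length
  · have hsplit : cs.length = (cs.length - 2) + 2 := by omega
    conv_rhs => rw [hsplit]
    rw [List.range_add, List.filter_append]
    have hnil : (List.filter (pvP cs) (List.map (fun x => cs.length - 2 + x) (List.range 2))) = [] := by
      rw [List.filter_eq_nil_iff]
      intro x hx
      simp only [List.mem_map, List.mem_range] at hx
      obtain ⟨j, hj, rfl⟩ := hx
      have hbnd : ¬ (cs.length - 2 + j + 3 ≤ cs.length) := by omega
      simp [pvP, hbnd]
    rw [hnil, List.append_nil]
    apply List.filter_congr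
    intro k hk
    rw [List.mem_range] at hk
    have hbnd : k + 3 ≤ cs.length := by omega
    simp [pvP, hbnd]
  · have ha : cs.length - 2 = 0 := by omega
    rw [ha, List.range_zero, List.filter_nil]
    symm
    rw [List.filter_eq_nil_iff]
    intro x hx
    rw [List.mem_range] at hx
    have hbnd : ¬ (x + 3 ≤ cs.length) := by omega
    simp [pvP, hbnd]
theorem pv_A_eq (s : String) :
    split_numbered_items s = pvPairs s.toList (pvF s.toList 0 ++ [s.toList.length]) := by
  simp only [split_numbered_items]
  set cs := s.toList with hcs
  -- step 1: the starts list is the Nat marker list, cast to Int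
  have hstarts : (PySem.List.pyRange 0 ((cs.length : Int) - 2) 1).filter (fun i =>
      PySem.Chars.isdigit (PySem.List.pyGetD cs i ' ')
      && (PySem.List.pyGetD cs (i + 1) ' ' == '.')
      && PySem.Chars.isspace (PySem.List.pyGetD cs (i + 2) ' '))
      = (pvF cs 0).map (fun m : Nat => (m : Int)) := by
    rw [PySem.List.pyRange_one]
    have h1 : (((cs.length : Int) - 2) - 0).toNat = cs.length - 2 := by omega
    rw [h1]
    have h2 : (fun k : Nat => (0 : Int) + (k : Int)) = (fun k : Nat => (k : Int)) := by
      funext k; omega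
    have hcong : List.filter ((fun i : Int =>
        PySem.Chars.isdigit (PySem.List.pyGetD cs i ' ')
        && (PySem.List.pyGetD cs (i + 1) ' ' == '.')
        && PySem.Chars.isspace (PySem.List.pyGetD cs (i + 2) ' ')) ∘ (fun k : Nat => (k : Int)))
        (List.range (cs.length - 2))
        = List.filter (fun k => PySem.Chars.isdigit (cs.getD k ' ') && (cs.getD (k + 1) ' ' == '.')
            && PySem.Chars.isspace (cs.getD (k + 2) ' ')) (List.range (cs.length - 2)) := by
      apply List.filter_congr
      intro k _
      simp only [Function.comp_apply]
      have e1 : ((k : Int) + 1) = ((k + 1 : Nat) : Int) := by push_cast; ring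
      have e2 : ((k : Int) + 2) = ((k + 2 : Nat) : Int) := by push_cast; ring
      rw [e1, e2, PySem.List.pyGetD_natCast, PySem.List.pyGetD_natCast, PySem.List.pyGetD_natCast]
    rw [h2, List.filter_map, hcong, pv_starts_eq]
  rw [hstarts]
  have hM : (pvF cs 0).map (fun m : Nat => (m : Int)) ++ [(cs.length : Int)]
      = ((pvF cs 0) ++ [cs.length]).map (fun m : Nat => (m : Int)) := by simp
  rw [hM]
  set M : List Nat := pvF cs 0 ++ [cs.length] with hMdef
  rw [PySem.List.foldl_append_singleton_eq_map, List.nil_append]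
  rw [PySem.List.pyRange_one]
  have h3 : ((((M.map (fun m : Nat => (m : Int))).length : Int) - 1) - 0).toNat = M.length - 1 := by
    simp
  rw [h3, List.map_map]
  have hgd : ∀ j : Nat, (M.map (fun m : Nat => (m : Int))).getD j 0 = ((M.getD j 0 : Nat) : Int) := by
    intro j
    simpa using List.getD_map M 0 (n := j) (fun m : Nat => (m : Int))
  have hfun : ∀ k : Nat,
      pvItemI cs (PySem.List.pyGetD (M.map (fun m : Nat => (m : Int))) ((0 : Int) + (k : Int)) 0)
        (PySem.List.pyGetD (M.map (fun m : Nat => (m : Int))) (((0 : Int) + (k : Int)) + 1) 0)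
      = pvItemI cs ((M.getD k 0 : Nat) : Int) ((M.getD (k + 1) 0 : Nat) : Int) := by
    intro k
    have e0 : ((0 : Int) + (k : Int)) = ((k : Nat) : Int) := by ring
    have e1 : (((0 : Int) + (k : Int)) + 1) = ((k + 1 : Nat) : Int) := by push_cast; ring
    rw [e1, e0, PySem.List.pyGetD_natCast, PySem.List.pyGetD_natCast, hgd, hgd]
  refine Eq.trans ?_ (pv_mapAdj cs (pvF cs 0)
    (fun x hx => by rw [pvF] at hx; exact List.of_mem_filter hx)
    (pv_chain cs (cs.length - 0) 0 rfl))
  apply List.map_congr_left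
  intro k _
  show pvItemI cs (PySem.List.pyGetD (M.map (fun m : Nat => (m : Int))) ((0 : Int) + (k : Int)) 0)
        (PySem.List.pyGetD (M.map (fun m : Nat => (m : Int))) (((0 : Int) + (k : Int)) + 1) 0)
      = pvItemI cs ((M.getD k 0 : Nat) : Int) ((M.getD (k + 1) 0 : Nat) : Int)
  exact hfun k

-- ===== VERDICT (by name: the statement is the Claim_ definition above) =====
theorem split_numbered_items_spec : Claim_equal_split_numbered_items := by
  intro s _
  unfold Spec_split_numbered_items split_numbered_items_alt
  rw [pv_A_eq]
  rw [pvLoop_eq s.toList (s.toList.length - 0) 0 none [] rfl]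
  simp
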